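-- pv_equiv track=rewrite | github.com/orudskyi/bpmn-text-verifier | src/module_c/verifier.py | _interleavings
-- ===== SOURCE A (Python) =====
-- import itertools
--
-- def _interleavings(branch_traces: list[list[str]]) -> list[list[str]]:
--     """Generate all interleavings of a list of sequential branch traces.
--
--     For two branches ``[A, B]`` and ``[C, D]``, the interleavings are all
--     permutations of the combined sequence that preserve the internal order of
--     each branch (i.e. A always before B, C always before D).
--
--     For simplicity and to limit explosion, this implementation generates
--     permutations of the *branches themselves* (not element-level interleavings).
--     This is equivalent to choosing the order in which parallel branches
--     complete — a sound approximation for DECLARE verification.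
--
--     Args:
--         branch_traces: Each element is the task-name sequence of one branch.
--
--     Returns:
--         List of merged traces (one per branch ordering).
--     """
--     if not branch_traces:
--         return [[]]
--     if len(branch_traces) == 1:
--         return [branch_traces[0]]
--
--     results: list[list[str]] = []
--     # Cap to avoid factorial explosion for many-branch parallels
--     max_perms = min(24, len(list(itertools.permutations(range(len(branch_traces))))))
--     for perm in list(itertools.permutations(branch_traces))[:max_perms]:
--         merged: list[str] = []
--         for branch in perm:
--             merged.extend(branch)
--         results.append(merged)
--     return results
-- ===== SOURCE B (Python) =====
-- def _interleavings(branch_traces: list[list[str]]) -> list[list[str]]: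
--     """Depth-first generation of branch-order merges, pruned after 24 results."""
--
--     def picks(xs):
--         # all ways to pick one element, paired with the rest (order kept)
--         if not xs:
--             return []
--         head, tail = xs[0], xs[1:]
--         return [(head, tail)] + [(y, [head] + ys) for (y, ys) in picks(tail)]
--
--     def go(remaining, acc, need):
--         if need == 0:
--             return []
--         if not remaining:
--             return [acc]
--         res = []
--         for branch, rest in picks(remaining):
--             res.extend(go(rest, acc + branch, need - len(res)))
--         return res
--
--     return go(branch_traces, [], 24)
-- ===== Notes on version B (the rewrite author's own statement) =====
-- stated objective: faster
-- what changed: A materialises the full factorial list of branch permutations via itertools and then flattens the first min(24, n!) of them; B is a depth-first recursion over pick-one/rest decompositions that emits merged traces directly and prunes each subtree as soon as 24 results exist.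
import Mathlib
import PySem

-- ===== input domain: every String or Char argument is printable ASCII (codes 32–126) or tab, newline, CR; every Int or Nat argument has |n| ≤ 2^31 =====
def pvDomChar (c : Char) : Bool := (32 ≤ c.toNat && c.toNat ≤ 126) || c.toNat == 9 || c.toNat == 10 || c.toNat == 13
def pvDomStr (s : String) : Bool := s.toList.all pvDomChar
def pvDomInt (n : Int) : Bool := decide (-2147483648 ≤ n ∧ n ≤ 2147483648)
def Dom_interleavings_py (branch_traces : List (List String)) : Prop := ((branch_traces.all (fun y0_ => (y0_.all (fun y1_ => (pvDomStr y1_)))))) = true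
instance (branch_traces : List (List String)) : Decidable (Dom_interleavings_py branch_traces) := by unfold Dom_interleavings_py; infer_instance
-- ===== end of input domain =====

-- B replaces A's full materialisation of all factorially many branch permutations by a
-- depth-first recursion that emits merged traces directly and is pruned once 24 exist.

-- termination helper for both ports (removing one element shortens the list)
theorem pvRemoveAt_length_lt {α : Type} (xs : List α) (i : Nat) (h : i < xs.length) :
    (xs.take i ++ xs.drop (i + 1)).length < xs.length := by
  simp [List.length_take, List.length_drop]; omega

-- ===== PORT A =====
-- port of the library call itertools.permutations: all permutations, in itertools'
-- documented order (positions chosen left-to-right in ascending index order)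
def pyPermutations {α : Type} [Inhabited α] (xs : List α) : List (List α) :=
  match xs with
  | [] => [[]]
  | y :: ys =>
    (List.range (y :: ys).length).attach.foldl
      (fun acc i =>
        acc ++ (pyPermutations ((y :: ys).take i.1 ++ (y :: ys).drop (i.1 + 1))).map
          (fun p => (y :: ys).getD i.1 default :: p)) []
  termination_by xs.length
  decreasing_by
    exact pvRemoveAt_length_lt (y :: ys) i.1 (by have := i.2; simpa using this)

def interleavings_py (branch_traces : List (List String)) : List (List String) :=
  match branch_traces with
  | [] => [[]]
  | b :: rest =>
    if rest.length = 0 then [b]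
    else
      let max_perms := min 24
        (pyPermutations (PySem.List.pyRange 0 (branch_traces.length : Int) 1)).length
      ((pyPermutations branch_traces).take max_perms).foldl
        (fun results perm =>
          results ++ [perm.foldl (fun merged branch => merged ++ branch) []]) []

-- ===== PORT B =====
-- all ways to pick one element of xs, paired with the remaining list (order kept)
def pvPicks {α : Type} : List α → List (α × List α)
  | [] => []
  | x :: xs => (x, xs) :: (pvPicks xs).map (fun p => (p.1, x :: p.2))

theorem pvPicks_rest_length {α : Type} (xs : List α) :
    ∀ p ∈ pvPicks xs, p.2.length + 1 = xs.length := by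
  induction xs with
  | nil => intro p hp; simp [pvPicks] at hp
  | cons x xs ih =>
    intro p hp
    simp only [pvPicks, List.mem_cons, List.mem_map] at hp
    rcases hp with rfl | ⟨q, hq, rfl⟩
    · simp
    · have := ih q hq; simp at this ⊢; omega

-- DFS: extend acc by each not-yet-used branch in turn, stop once `need` traces exist
def pvGo (remaining : List (List String)) (acc : List String) (need : Nat) :
    List (List String) :=
  if need = 0 then []
  else
    match remaining with
    | [] => [acc]
    | y :: ys =>
      (pvPicks (y :: ys)).attach.foldl
        (fun res p => res ++ pvGo p.1.2 (acc ++ p.1.1) (need - res.length)) []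
  termination_by remaining.length
  decreasing_by
    have := pvPicks_rest_length (y :: ys) p.1 p.2
    simp only [List.length_cons] at this ⊢
    omega

def interleavings_py_alt (branch_traces : List (List String)) : List (List String) :=
  pvGo branch_traces [] 24

-- ===== PRECONDITION & SPEC =====
def Spec_interleavings_py (branch_traces : List (List String)) (out : List (List String)) : Prop := out = interleavings_py_alt branch_traces
instance (branch_traces : List (List String)) (out : List (List String)) : Decidable (Spec_interleavings_py branch_traces out) := by unfold Spec_interleavings_py; infer_instance

-- ===== CLAIM (what is proved, stated in full; the proofs are below) =====
def Claim_equal_interleavings_py : Prop := ∀ (branch_traces : List (List String)), Dom_interleavings_py branch_traces → Spec_interleavings_py branch_traces (interleavings_py branch_traces)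

-- ===== LEMMAS AND PROOFS =====

theorem pyPermutations_nil {α : Type} [Inhabited α] : pyPermutations ([] : List α) = [[]] := by
  simp [pyPermutations.eq_def]

-- pvPicks as index-based removal
theorem pvPicks_eq_map_range {α : Type} [Inhabited α] (xs : List α) :
    pvPicks xs = (List.range xs.length).map
      (fun i => (xs.getD i default, xs.take i ++ xs.drop (i + 1))) := by
  induction xs with
  | nil => simp [pvPicks]
  | cons x xs ih =>
    simp [pvPicks, ih, List.range_succ_eq_map, Function.comp_def]

-- itertools' recursion, expressed through pvPicks
theorem pyPermutations_cons {α : Type} [Inhabited α] (x : α) (xs : List α) :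
    pyPermutations (x :: xs)
      = (pvPicks (x :: xs)).flatMap (fun p => (pyPermutations p.2).map (p.1 :: ·)) := by
  rw [show pyPermutations (x :: xs)
      = (List.range (x :: xs).length).attach.foldl
          (fun acc i =>
            acc ++ (pyPermutations ((x :: xs).take i.1 ++ (x :: xs).drop (i.1 + 1))).map
              (fun p => (x :: xs).getD i.1 default :: p)) []
    from by rw [pyPermutations.eq_def]]
  rw [List.foldl_attach
    (f := fun acc (i : Nat) =>
      acc ++ (pyPermutations ((x :: xs).take i ++ (x :: xs).drop (i + 1))).map
        (fun p => (x :: xs).getD i default :: p))]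
  rw [PySem.List.foldl_append_eq_flatMap]
  rw [pvPicks_eq_map_range, List.flatMap_map]
  simp

theorem pvPicks_length {α : Type} (xs : List α) : (pvPicks xs).length = xs.length := by
  induction xs with
  | nil => simp [pvPicks]
  | cons x xs ih => simp [pvPicks, ih]

theorem pyPermutations_length {α : Type} [Inhabited α] :
    ∀ n (xs : List α), xs.length ≤ n →
      (pyPermutations xs).length = Nat.factorial xs.length := by
  intro n
  induction n with
  | zero =>
    intro xs h
    have : xs = [] := by cases xs <;> simp_all
    subst this; simp [pyPermutations_nil]
  | succ n ih =>
    intro xs h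
    match xs with
    | [] => simp [pyPermutations_nil]
    | x :: xs =>
      rw [pyPermutations_cons, List.length_flatMap]
      have hmap : ((pvPicks (x :: xs)).map
          (fun p => ((pyPermutations p.2).map (p.1 :: ·)).length))
          = List.replicate (xs.length + 1) (Nat.factorial xs.length) := by
        apply List.eq_replicate_iff.mpr
        constructor
        · simp [pvPicks_length]
        · intro b hb
          simp only [List.mem_map] at hb
          obtain ⟨p, hp, rfl⟩ := hb
          have hlen := pvPicks_rest_length (x :: xs) p hp
          simp only [List.length_cons] at hlen
          have h2 : p.2.length = xs.length := by omega
          rw [List.length_map, ih p.2 (by simp at h; omega), h2]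
      rw [hmap, List.sum_replicate, smul_eq_mul, List.length_cons, Nat.factorial_succ]

-- generic threaded-take fold: extending the result list by take-truncated pieces,
-- the budget shrinking by what is already there, is a take of the flatMap
theorem pvFoldTake {α β : Type} (f : α → Nat → List β) (g : α → List β) (need : Nat)
    (ps : List α) (hf : ∀ p ∈ ps, ∀ k, f p k = (g p).take k) :
    ∀ res : List β, res.length ≤ need →
      ps.foldl (fun res p => res ++ f p (need - res.length)) res
        = res ++ (ps.flatMap g).take (need - res.length) := by
  induction ps with
  | nil => intro res _; simp
  | cons p ps ih =>
    intro res hres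
    have hfp := hf p (by simp)
    have hrest : ∀ q ∈ ps, ∀ k, f q k = (g q).take k := fun q hq => hf q (by simp [hq])
    simp only [List.foldl_cons, hfp]
    have hlen : (res ++ (g p).take (need - res.length)).length ≤ need := by
      simp [List.length_take]; omega
    have hc : need - (res ++ (g p).take (need - res.length)).length
        = need - res.length - (g p).length := by
      simp [List.length_take]; omega
    rw [ih hrest _ hlen, hc, List.flatMap_cons, List.take_append, List.append_assoc]

-- the DFS computes the take-truncated list of merged permutations
theorem pvGo_eq : ∀ n (remaining : List (List String)), remaining.length ≤ n →
    ∀ acc need, pvGo remaining acc need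
      = ((pyPermutations remaining).map (fun p => acc ++ p.flatten)).take need := by
  intro n
  induction n with
  | zero =>
    intro rem h acc need
    have : rem = [] := by cases rem <;> simp_all
    subst this
    by_cases hneed : need = 0
    · simp [pvGo, pyPermutations_nil, hneed]
    · simp [pvGo, pyPermutations_nil, hneed]; omega
  | succ n ih =>
    intro rem h acc need
    match rem with
    | [] =>
      by_cases hneed : need = 0
      · simp [pvGo, pyPermutations_nil, hneed]
      · simp [pvGo, pyPermutations_nil, hneed]; omega
    | x :: xs =>
      by_cases hneed : need = 0
      · simp [pvGo, hneed]
      conv_lhs => rw [pvGo.eq_def]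
      simp only [hneed, if_false]
      rw [List.foldl_attach
        (f := fun (res : List (List String)) (p : List String × List (List String)) =>
          res ++ pvGo p.2 (acc ++ p.1) (need - res.length))]
      rw [pvFoldTake (f := fun p k => pvGo p.2 (acc ++ p.1) k)
        (g := fun p => (pyPermutations p.2).map (fun q => acc ++ p.1 ++ q.flatten))
        (need := need) (ps := pvPicks (x :: xs))
        (hf := by
          intro p hp k
          have hlen := pvPicks_rest_length (x :: xs) p hp
          show pvGo p.2 (acc ++ p.1) k
            = ((pyPermutations p.2).map (fun q => acc ++ p.1 ++ q.flatten)).take k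
          rw [ih p.2 (by simp at h hlen ⊢; omega) (acc ++ p.1) k])
        ([]) (by simp)]
      rw [pyPermutations_cons]
      simp [List.map_flatMap, List.map_map, Function.comp_def, List.append_assoc]

-- merged-trace loop is flatten
theorem pvFoldlAppend {β : Type} (l : List (List β)) :
    ∀ acc, l.foldl (fun merged branch => merged ++ branch) acc = acc ++ l.flatten := by
  induction l with
  | nil => simp
  | cons x xs ih => intro acc; simp [ih, List.append_assoc]

-- results loop is map
theorem pvFoldlPush {α β : Type} (l : List α) (f : α → β) :
    ∀ init, l.foldl (fun results perm => results ++ [f perm]) init = init ++ l.map f := by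
  induction l with
  | nil => simp
  | cons x xs ih => intro init; simp [ih]

theorem pvTakeMin24 {β : Type} (L : List β) (m : Nat) (hm : L.length ≤ m) :
    L.take (min 24 m) = L.take 24 := by
  by_cases h : 24 ≤ m
  · rw [Nat.min_eq_left h]
  · rw [Nat.min_eq_right (by omega), List.take_of_length_le hm,
      List.take_of_length_le (by omega)]

-- A on two or more branches: the first min(24, n!) permutations, flattened
theorem pvA_eq (x y : List String) (rest : List (List String)) :
    interleavings_py (x :: y :: rest)
      = ((pyPermutations (x :: y :: rest)).take 24).map List.flatten := by
  rw [interleavings_py]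
  rw [if_neg (show ¬((y :: rest).length = 0) by simp)]
  have hr : (PySem.List.pyRange 0 (((x :: y :: rest).length : Nat) : Int) 1).length
      = (x :: y :: rest).length := by
    rw [PySem.List.length_pyRange_one]; omega
  have hlen1 := pyPermutations_length (α := Int)
    (PySem.List.pyRange 0 (((x :: y :: rest).length : Nat) : Int) 1).length
    (PySem.List.pyRange 0 (((x :: y :: rest).length : Nat) : Int) 1) le_rfl
  rw [hr] at hlen1
  have hlen2 : (pyPermutations (x :: y :: rest)).length
      = Nat.factorial (x :: y :: rest).length :=
    pyPermutations_length _ _ le_rfl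
  rw [hlen1]
  simp only [pvTakeMin24 _ _ (le_of_eq hlen2), pvFoldlPush, List.nil_append]
  apply List.map_congr_left
  intro p _
  rw [pvFoldlAppend, List.nil_append]

-- ===== VERDICT (by name: the statement is the Claim_ definition above) =====
theorem interleavings_py_spec : Claim_equal_interleavings_py := by
  intro bt _
  unfold Spec_interleavings_py interleavings_py_alt
  rw [pvGo_eq bt.length bt le_rfl [] 24]
  match bt with
  | [] => simp [interleavings_py, pyPermutations_nil]
  | [b] =>
    simp [interleavings_py, pyPermutations_cons, pvPicks, pyPermutations_nil]
  | x :: y :: rest =>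
    rw [pvA_eq, List.map_take]
    simp
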